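-- pv_equiv track=rewrite | github.com/dasmorphy/security-movil-back | swagger_server/uses_cases/logbook_use_case.py | agrupar_por_categoria
-- ===== SOURCE A (Python) =====
-- from collections import OrderedDict, defaultdict
--
-- def agrupar_por_categoria(logbook_entry_rows):
--     agrupado = OrderedDict()
--
--     for row in logbook_entry_rows:
--         category_id = row[2]
--
--         if category_id not in agrupado:
--             # Guardamos la fila base
--             agrupado[category_id] = list(row)
--         else:
--             # Sumamos SOLO la cantidad (índice 4)
--             agrupado[category_id][4] += row[4]
--
--     # Convertimos de vuelta a tuplas
--     return [tuple(row) for row in agrupado.values()]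
-- ===== SOURCE B (Python) =====
-- from collections import defaultdict
--
-- def agrupar_por_categoria(logbook_entry_rows):
--     # Pass 1: group rows by category (insertion order of first appearance).
--     grupos = defaultdict(list)
--     for row in logbook_entry_rows:
--         grupos[row[2]].append(row)
--     # Pass 2: reduce each group: first row is the base, field 4 gets the group total.
--     resultado = []
--     for grupo in grupos.values():
--         base = grupo[0]
--         extra = sum(r[4] for r in grupo[1:])
--         resultado.append(tuple(v + extra if i == 4 else v for i, v in enumerate(base)))
--     return resultado
-- ===== Notes on version B (the rewrite author's own statement) =====
-- stated objective: alternative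
-- what changed: Replaces A's single-pass incremental accumulation into an OrderedDict by a two-phase group-then-reduce: pass 1 builds a defaultdict(list) of all rows per category, pass 2 reduces each group by summing field 4 over the tail and rebuilding the base row via enumerate.
import Mathlib
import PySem

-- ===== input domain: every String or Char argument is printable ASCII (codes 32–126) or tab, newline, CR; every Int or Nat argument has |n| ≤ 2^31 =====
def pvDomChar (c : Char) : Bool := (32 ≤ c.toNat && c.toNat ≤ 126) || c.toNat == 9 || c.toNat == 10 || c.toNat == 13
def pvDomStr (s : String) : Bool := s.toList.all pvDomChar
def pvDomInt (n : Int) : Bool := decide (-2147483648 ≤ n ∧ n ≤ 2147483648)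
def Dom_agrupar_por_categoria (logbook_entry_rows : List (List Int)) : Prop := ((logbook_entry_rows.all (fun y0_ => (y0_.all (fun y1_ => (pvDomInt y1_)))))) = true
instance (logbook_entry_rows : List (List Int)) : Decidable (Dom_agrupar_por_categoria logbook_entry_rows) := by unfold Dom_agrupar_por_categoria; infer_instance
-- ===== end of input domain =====

-- B replaces A's incremental in-loop accumulation by a two-phase group-then-reduce (same cost); return value only, no argument is mutated.

-- ===== PORT A =====
-- rows are List Int; a Python tuple of ints of variable length is also List Int, so tuple(row) is the identity map.
def agrupar_por_categoria (logbook_entry_rows : List (List Int)) : List (List Int) :=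
  let agrupado :=
    logbook_entry_rows.foldl (fun (d : PySem.Dict Int (List Int)) row =>
      let cid := PySem.List.pyGetD row 2 0          -- row[2]; exact inside Pre_ (3 ≤ row.length)
      if d.contains cid = false then
        d.insert cid row                            -- agrupado[cid] = list(row)
      else
        let base := d.getD cid []
        d.insert cid (base.set 4 (PySem.List.pyGetD base 4 0 + PySem.List.pyGetD row 4 0))) -- agrupado[cid][4] += row[4]; exact inside Pre_
      PySem.Dict.empty
  agrupado.values.map (fun row => row)              -- [tuple(row) for row in agrupado.values()]

-- ===== PORT B =====
def agrupar_por_categoria_alt (logbook_entry_rows : List (List Int)) : List (List Int) :=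
  let grupos :=
    logbook_entry_rows.foldl (fun (d : PySem.Dict Int (List (List Int))) row =>
      d.modify (PySem.List.pyGetD row 2 0) [] (· ++ [row]))   -- grupos[row[2]].append(row); row[2] exact inside Pre_
      PySem.Dict.empty
  grupos.values.foldl (fun resultado grupo =>
    let base := PySem.List.pyGetD grupo 0 []                  -- grupo[0] (groups are nonempty)
    let rest := grupo.drop 1                                  -- grupo[1:]
    let extra := rest.foldl (fun s r => s + PySem.List.pyGetD r 4 0) 0   -- sum(r[4] for r in grupo[1:]); exact inside Pre_
    resultado ++ [(PySem.List.enumerate base 0).map (fun p => if p.1 = 4 then p.2 + extra else p.2)])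
    []

-- ===== PRECONDITION & SPEC =====
-- Pre_ is exactly where the Python A returns: every row needs row[2] (length ≥ 3), and every row of a
-- category occurring more than once additionally needs row[4] (length ≥ 5), else A raises IndexError.
def Pre_agrupar_por_categoria (logbook_entry_rows : List (List Int)) : Prop :=
  ∀ r ∈ logbook_entry_rows, 3 ≤ r.length ∧
    (2 ≤ logbook_entry_rows.countP
        (fun s => PySem.List.pyGetD s 2 0 == PySem.List.pyGetD r 2 0) → 5 ≤ r.length)
instance (logbook_entry_rows : List (List Int)) : Decidable (Pre_agrupar_por_categoria logbook_entry_rows) := by unfold Pre_agrupar_por_categoria; infer_instance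

def pvWitness_agrupar_por_categoria : List (List Int) := [[1, 2, 3, 4, 5], [9, 9, 3, 9, 7], [0, 0, 8]]

def Spec_agrupar_por_categoria (logbook_entry_rows : List (List Int)) (out : List (List Int)) : Prop := out = agrupar_por_categoria_alt logbook_entry_rows
instance (logbook_entry_rows : List (List Int)) (out : List (List Int)) : Decidable (Spec_agrupar_por_categoria logbook_entry_rows out) := by unfold Spec_agrupar_por_categoria; infer_instance

-- ===== CLAIM (what is proved, stated in full; the proofs are below) =====
def Claim_equal_agrupar_por_categoria : Prop := ∀ (logbook_entry_rows : List (List Int)), Dom_agrupar_por_categoria logbook_entry_rows → Pre_agrupar_por_categoria logbook_entry_rows → Spec_agrupar_por_categoria logbook_entry_rows (agrupar_por_categoria logbook_entry_rows)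

-- ===== LEMMAS AND PROOFS =====

-- Proof-side helpers: named versions of the two fold bodies and the reduce step.
def keyf (r : List Int) : Int := PySem.List.pyGetD r 2 0
def updf (cur r : List Int) : List Int := cur.set 4 (PySem.List.pyGetD cur 4 0 + PySem.List.pyGetD r 4 0)
def valA (d : PySem.Dict Int (List Int)) (r : List Int) : List Int :=
  if d.contains (keyf r) = false then r else updf (d.getD (keyf r) []) r
def stepA (d : PySem.Dict Int (List Int)) (r : List Int) : PySem.Dict Int (List Int) :=
  d.insert (keyf r) (valA d r)
def stepB (d : PySem.Dict Int (List (List Int))) (r : List Int) : PySem.Dict Int (List (List Int)) :=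
  d.modify (keyf r) [] (· ++ [r])
def gstep (o : Option (List Int)) (r : List Int) : Option (List Int) :=
  match o with
  | none => some r
  | some cur => some (updf cur r)

@[simp] lemma gstep_none (r : List Int) : gstep none r = some r := rfl
@[simp] lemma gstep_some_eq (cur r : List Int) : gstep (some cur) r = some (updf cur r) := rfl
def finB (grupo : List (List Int)) : List Int :=
  (PySem.List.enumerate (PySem.List.pyGetD grupo 0 []) 0).map
    (fun p => if p.1 = 4 then p.2 + (grupo.drop 1).foldl (fun s r => s + PySem.List.pyGetD r 4 0) 0 else p.2)

lemma portA_eq (rows : List (List Int)) :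
    agrupar_por_categoria rows = ((rows.foldl stepA PySem.Dict.empty).values).map (fun row => row) := by
  unfold agrupar_por_categoria
  have h : (fun (d : PySem.Dict Int (List Int)) row =>
      let cid := PySem.List.pyGetD row 2 0
      if d.contains cid = false then
        d.insert cid row
      else
        let base := d.getD cid []
        d.insert cid (base.set 4 (PySem.List.pyGetD base 4 0 + PySem.List.pyGetD row 4 0))) = stepA := by
    funext d r
    by_cases h : d.contains (PySem.List.pyGetD r 2 0) = false <;>
      simp [stepA, valA, keyf, updf, h]
  rw [h]

lemma portB_eq (rows : List (List Int)) :
    agrupar_por_categoria_alt rows = ((rows.foldl stepB PySem.Dict.empty).values).map finB := by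
  unfold agrupar_por_categoria_alt
  have h : (fun (d : PySem.Dict Int (List (List Int))) row =>
      d.modify (PySem.List.pyGetD row 2 0) [] (· ++ [row])) = stepB := rfl
  rw [h]
  exact PySem.List.foldl_append_singleton_eq_map finB _ []

lemma gstep_some (rest : List (List Int)) : ∀ b, rest.foldl gstep (some b) = some (rest.foldl updf b) := by
  induction rest with
  | nil => intro b; rfl
  | cons r rest ih => intro b; simpa [gstep] using ih (updf b r)

lemma foldlA_get? (rows : List (List Int)) : ∀ (d : PySem.Dict Int (List Int)) (k : Int),
    (rows.foldl stepA d).get? k = (rows.filter (fun r => keyf r == k)).foldl gstep (d.get? k) := by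
  induction rows with
  | nil => intro d k; rfl
  | cons r rows ih =>
    intro d k
    simp only [List.foldl_cons, List.filter_cons]
    by_cases h : keyf r = k
    · subst h
      rw [if_pos (by simp), List.foldl_cons, ih]
      congr 1
      rw [show stepA d r = d.insert (keyf r) (valA d r) from rfl, PySem.Dict.get?_insert_self]
      cases hc : d.get? (keyf r) with
      | none =>
        have hcf : d.contains (keyf r) = false := (PySem.Dict.get?_eq_none_iff_contains d (keyf r)).1 hc
        simp [valA, hcf]
      | some cur =>
        have hcon : d.contains (keyf r) = true := by
          rw [PySem.Dict.contains_eq_isSome_get?, hc]; rfl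
        have hgd : d.getD (keyf r) [] = cur := PySem.Dict.getD_of_get?_eq_some d [] hc
        simp [valA, hcon, hgd]
    · rw [if_neg (by simp [h]), ih]
      congr 1
      exact PySem.Dict.get?_insert_of_ne d _ (fun hkk => h hkk.symm)

lemma foldlB_getD (rows : List (List Int)) (k : Int) :
    (rows.foldl stepB PySem.Dict.empty).getD k [] = rows.filter (fun r => keyf r == k) := by
  have h1 : rows.foldl stepB PySem.Dict.empty
      = (rows.map (fun r => (keyf r, r))).foldl (fun d p => d.modify p.1 [] (· ++ [p.2])) PySem.Dict.empty :=
    (List.foldl_map (f := fun r => (keyf r, r))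
      (g := fun d p => d.modify p.1 [] (· ++ [p.2])) (l := rows) (init := PySem.Dict.empty)).symm
  rw [h1, PySem.Dict.getD_foldl_modify_append]
  simp [List.filter_map, Function.comp_def]

lemma keysA (rows : List (List Int)) :
    (rows.foldl stepA PySem.Dict.empty).keys = PySem.Set.ofList (rows.map keyf) := by
  simpa using PySem.Dict.keys_foldl_insert_key rows keyf (fun d r => valA d r) PySem.Dict.empty

lemma keysB (rows : List (List Int)) :
    (rows.foldl stepB PySem.Dict.empty).keys = PySem.Set.ofList (rows.map keyf) := by
  simpa using PySem.Dict.keys_foldl_modify_key rows keyf [] (fun _ r g => g ++ [r]) PySem.Dict.empty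

lemma nodupA (rows : List (List Int)) : (rows.foldl stepA PySem.Dict.empty).keys.Nodup :=
  PySem.Dict.nodup_keys_foldl_insert_key rows keyf (fun d r => valA d r) PySem.Dict.empty
    (by simp)

lemma nodupB (rows : List (List Int)) : (rows.foldl stepB PySem.Dict.empty).keys.Nodup :=
  PySem.Dict.nodup_keys_foldl_modify_key rows keyf [] (fun _ r g => g ++ [r]) PySem.Dict.empty
    (by simp)

lemma pyGetD_in_range (l : List Int) (h : 4 < l.length) : PySem.List.pyGetD l 4 0 = l[4] := by
  simp [pysem]
  exact List.getD_eq_getElem l 0 h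

lemma set_pyGetD_self (l : List Int) : l.set 4 (PySem.List.pyGetD l 4 0 + 0) = l := by
  rw [add_zero]
  by_cases h : 4 < l.length
  · rw [pyGetD_in_range l h]; exact List.set_getElem_self h
  · exact List.set_eq_of_length_le (by omega)

lemma enumMap (b : List Int) (e : Int) :
    (PySem.List.enumerate b 0).map (fun p => if p.1 = 4 then p.2 + e else p.2)
      = b.set 4 (PySem.List.pyGetD b 4 0 + e) := by
  apply List.ext_getElem
  · simp [PySem.List.length_enumerate]
  · intro i h1 h2
    have hi : i < b.length := by simpa [PySem.List.length_enumerate] using h1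
    rw [List.getElem_map, PySem.List.getElem_enumerate b 0 i (by simpa [PySem.List.length_enumerate] using hi)]
    rw [List.getElem_set]
    by_cases h4 : i = 4
    · subst h4
      have : 4 < b.length := hi
      simp [pyGetD_in_range b this]
    · have hii : ¬ ((i : Int) = 4) := by omega
      have h4i : ¬ (4 = i) := fun hh => h4 hh.symm
      simp [hii, h4i]

lemma updFold (rest : List (List Int)) : ∀ b : List Int, 5 ≤ b.length →
    rest.foldl updf b = b.set 4 (PySem.List.pyGetD b 4 0
      + (rest.map (fun r => PySem.List.pyGetD r 4 0)).sum) := by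
  induction rest with
  | nil =>
    intro b hb
    simp only [List.foldl_nil, List.map_nil, List.sum_nil]
    exact (set_pyGetD_self b).symm
  | cons r rest ih =>
    intro b hb
    have hlen : 5 ≤ (updf b r).length := by simpa [updf] using hb
    have h4 : 4 < (updf b r).length := by omega
    rw [List.foldl_cons, ih (updf b r) hlen]
    have hg : PySem.List.pyGetD (updf b r) 4 0
        = PySem.List.pyGetD b 4 0 + PySem.List.pyGetD r 4 0 := by
      rw [pyGetD_in_range _ h4]
      simp [updf]
    rw [hg]
    simp [updf, List.set_set, add_assoc]

lemma perKey (rows : List (List Int)) (hpre : Pre_agrupar_por_categoria rows) (k : Int)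
    (hk : rows.filter (fun r => keyf r == k) ≠ []) :
    (rows.foldl stepA PySem.Dict.empty).getD k []
      = finB ((rows.foldl stepB PySem.Dict.empty).getD k []) := by
  rw [foldlB_getD]
  obtain ⟨b, rest, hgrp⟩ := List.exists_cons_of_ne_nil hk
  have hbk : keyf b = k := by
    have : b ∈ rows.filter (fun r => keyf r == k) := by rw [hgrp]; exact List.mem_cons_self
    have := List.of_mem_filter this
    exact eq_of_beq this
  have hget : (rows.foldl stepA PySem.Dict.empty).get? k = some (rest.foldl updf b) := by
    rw [foldlA_get? rows PySem.Dict.empty k, hgrp]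
    simp only [PySem.Dict.get?_empty, List.foldl_cons]
    rw [show gstep none b = some b from rfl]
    exact gstep_some rest b
  rw [PySem.Dict.getD_of_get?_eq_some _ [] hget, hgrp]
  have hbase : PySem.List.pyGetD (b :: rest) 0 [] = b := by simp [pysem]
  by_cases hrest : rest = []
  · subst hrest
    simp only [finB, hbase, List.drop_one, List.tail_cons, List.foldl_nil]
    rw [enumMap b 0]
    exact (set_pyGetD_self b).symm
  · have hb5 : 5 ≤ b.length := by
      have hbmem : b ∈ rows := List.mem_of_mem_filter (by rw [hgrp]; exact List.mem_cons_self)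
      apply (hpre b hbmem).2
      rw [List.countP_eq_length_filter]
      have hpred : (fun s => PySem.List.pyGetD s 2 0 == PySem.List.pyGetD b 2 0)
          = (fun r => keyf r == k) := by
        funext s; rw [show PySem.List.pyGetD b 2 0 = keyf b from rfl, hbk]; rfl
      rw [hpred, hgrp]
      have : rest.length ≠ 0 := fun h0 => hrest (List.eq_nil_of_length_eq_zero h0)
      simp only [List.length_cons]
      omega
    simp only [finB, hbase, List.drop_one, List.tail_cons]
    rw [PySem.List.foldl_add (g := fun r => PySem.List.pyGetD r 4 0) rest 0, zero_add]
    rw [enumMap b ((rest.map fun r => PySem.List.pyGetD r 4 0).sum)]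
    exact updFold rest b hb5

-- ===== VERDICT (by name: the statement is the Claim_ definition above) =====
theorem agrupar_por_categoria_spec : Claim_equal_agrupar_por_categoria := by
  intro rows hdom hpre
  show agrupar_por_categoria rows = agrupar_por_categoria_alt rows
  rw [portA_eq, portB_eq,
    PySem.Dict.values_eq_map_keys _ (nodupA rows) [],
    PySem.Dict.values_eq_map_keys _ (nodupB rows) [],
    keysA, keysB, List.map_map, List.map_map]
  apply List.map_congr_left
  intro k hk
  have hk' : k ∈ rows.map keyf := (PySem.Set.mem_ofList _ _).1 hk
  obtain ⟨r, hr, hrk⟩ := List.mem_map.1 hk'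
  have hne : rows.filter (fun r => keyf r == k) ≠ [] := by
    intro h0
    have : r ∈ rows.filter (fun r => keyf r == k) := List.mem_filter.2 ⟨hr, by simp [hrk]⟩
    simp [h0] at this
  simpa using perKey rows hpre k hne
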